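-- pv_equiv track=rewrite | github.com/tuetexo/SuperALGOs | SIMON 3264.py | simon_encrypt
-- ===== SOURCE A (Python) =====
-- def simon_encrypt(plain, key):
--     x, y = plain >> 16, plain & 0xFFFF
--     k = [key & 0xFFFF]
--     for i in range(31): k.append(k[-1] ^ ((k[-1] << 1) | (k[-1] >> 15)) ^ 0xFF00)
--     for r in range(32):
--         t = ((x << 1) | (x >> 15)) & 0xFFFF
--         t ^= ((x << 8) | (x >> 8)) & 0xFFFF
--         t ^= y ^ k[r]
--         y = x; x = t
--     return (x << 16) | y
-- ===== SOURCE B (Python) =====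
-- def simon_encrypt(plain, key):
--     # Fused single pass: a scalar running round key replaces A's precomputed
--     # 32-element key list, and the schedule advance is interleaved with the
--     # rounds; written as a tail recursion on the remaining round count.
--     def go(n, ck, x, y):
--         if n == 0:
--             return (x << 16) | y
--         t = (((x << 1) | (x >> 15)) & 0xFFFF) ^ (((x << 8) | (x >> 8)) & 0xFFFF) ^ y ^ ck
--         return go(n - 1, ck ^ ((ck << 1) | (ck >> 15)) ^ 0xFF00, t, x)
--     return go(32, key & 0xFFFF, plain >> 16, plain & 0xFFFF)
-- ===== Notes on version B (the rewrite author's own statement) =====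
-- stated objective: alternative
-- what changed: Replaces A's precomputed 32-element key-schedule list and separate round loop (indexed k[r]) by one fused tail-recursive pass that carries a single scalar running round key, advancing it after each round; no list is ever built.
import Mathlib
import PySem

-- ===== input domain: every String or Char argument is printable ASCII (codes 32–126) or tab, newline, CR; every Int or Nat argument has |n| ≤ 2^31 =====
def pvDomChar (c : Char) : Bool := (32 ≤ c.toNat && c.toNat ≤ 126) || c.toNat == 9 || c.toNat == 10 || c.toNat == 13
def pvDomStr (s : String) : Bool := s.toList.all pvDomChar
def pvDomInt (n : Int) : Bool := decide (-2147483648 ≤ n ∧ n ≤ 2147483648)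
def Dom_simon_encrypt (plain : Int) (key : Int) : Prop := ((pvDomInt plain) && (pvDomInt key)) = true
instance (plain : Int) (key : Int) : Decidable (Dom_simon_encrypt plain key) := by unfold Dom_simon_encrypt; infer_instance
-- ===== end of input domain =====

-- SIMON 32/64 encryption: B fuses A's key-schedule list build and round loop into one
-- tail-recursive pass carrying a scalar running round key (objective: alternative).


-- ===== PORT A =====
def simon_encrypt (plain : Int) (key : Int) : Int :=
  let x := plain >>> 16
  let y := PySem.Int.band plain 0xFFFF
  -- k = [key & 0xFFFF]; for i in range(31): k.append(k[-1] ^ ((k[-1] << 1) | (k[-1] >> 15)) ^ 0xFF00)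
  -- (k[-1] via pyGet?; the list is never empty, so the IndexError default 0 is never taken)
  let k := (PySem.List.pyRange 0 31 1).foldl
    (fun (k : List Int) _ =>
      let last := (PySem.List.pyGet? k (-1)).getD 0
      k ++ [PySem.Int.bxor (PySem.Int.bxor last (PySem.Int.bor (last <<< 1) (last >>> 15))) 0xFF00])
    [PySem.Int.band key 0xFFFF]
  -- for r in range(32): t = ...; y = x; x = t    (k[r] via pyGet?, always in range 0..31)
  let xy := (PySem.List.pyRange 0 32 1).foldl
    (fun (xy : Int × Int) r =>
      let x := xy.1
      let y := xy.2
      let t := PySem.Int.band (PySem.Int.bor (x <<< 1) (x >>> 15)) 0xFFFF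
      let t := PySem.Int.bxor t (PySem.Int.band (PySem.Int.bor (x <<< 8) (x >>> 8)) 0xFFFF)
      let t := PySem.Int.bxor t (PySem.Int.bxor y ((PySem.List.pyGet? k r).getD 0))
      (t, x))
    (x, y)
  PySem.Int.bor (xy.1 <<< 16) xy.2

-- ===== PORT B =====
-- go(n, ck, x, y) from Source B: tail recursion on the remaining round count n
def simonGo : Nat → Int → Int → Int → Int
  | 0, _, x, y => PySem.Int.bor (x <<< 16) y
  | n + 1, ck, x, y =>
    let t := PySem.Int.bxor (PySem.Int.bxor (PySem.Int.bxor
        (PySem.Int.band (PySem.Int.bor (x <<< 1) (x >>> 15)) 0xFFFF)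
        (PySem.Int.band (PySem.Int.bor (x <<< 8) (x >>> 8)) 0xFFFF)) y) ck
    simonGo n (PySem.Int.bxor (PySem.Int.bxor ck (PySem.Int.bor (ck <<< 1) (ck >>> 15))) 0xFF00) t x

def simon_encrypt_alt (plain : Int) (key : Int) : Int :=
  simonGo 32 (PySem.Int.band key 0xFFFF) (plain >>> 16) (PySem.Int.band plain 0xFFFF)

-- ===== PRECONDITION & SPEC =====
def Spec_simon_encrypt (plain : Int) (key : Int) (out : Int) : Prop := out = simon_encrypt_alt plain key
instance (plain : Int) (key : Int) (out : Int) : Decidable (Spec_simon_encrypt plain key out) := by unfold Spec_simon_encrypt; infer_instance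

-- ===== CLAIM (what is proved, stated in full; the proofs are below) =====
def Claim_equal_simon_encrypt : Prop := ∀ (plain : Int) (key : Int), Dom_simon_encrypt plain key → Spec_simon_encrypt plain key (simon_encrypt plain key)

-- ===== LEMMAS AND PROOFS =====

-- the key-schedule step (A's append expression = B's running-key advance)
def keyStep (k : Int) : Int :=
  PySem.Int.bxor (PySem.Int.bxor k (PySem.Int.bor (k <<< 1) (k >>> 15))) 0xFF00

-- the round function with B's grouping of the xors
def roundT (ck x y : Int) : Int :=
  PySem.Int.bxor (PySem.Int.bxor (PySem.Int.bxor
      (PySem.Int.band (PySem.Int.bor (x <<< 1) (x >>> 15)) 0xFFFF)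
      (PySem.Int.band (PySem.Int.bor (x <<< 8) (x >>> 8)) 0xFFFF)) y) ck

-- pair-state version of simonGo
def pairGo : Nat → Int → Int → Int → Int × Int
  | 0, _, x, y => (x, y)
  | n + 1, ck, x, y => pairGo n (keyStep ck) (roundT ck x y) x

theorem bxor_eq_xor (a b : Int) : PySem.Int.bxor a b = Int.xor a b := by
  have h : ∀ n : Nat, ((n : Int) + 1).toNat = n + 1 := fun n => by omega
  unfold PySem.Int.bxor
  by_cases ha : 0 ≤ a <;> by_cases hb : 0 ≤ b <;> simp [ha, hb] <;> cases a <;> cases b <;>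
    simp_all [Int.xor, Int.toNat, Int.negSucc_eq] <;> omega

theorem bxor_assoc (a b c : Int) :
    PySem.Int.bxor (PySem.Int.bxor a b) c = PySem.Int.bxor a (PySem.Int.bxor b c) := by
  simp only [bxor_eq_xor]
  cases a <;> cases b <;> cases c <;> simp [Int.xor, Nat.xor_assoc]

theorem pyGet_append_last (xs : List Int) (x : Int) :
    (PySem.List.pyGet? (xs ++ [x]) (-1)).getD 0 = x := by
  simp [PySem.List.pyGet?, PySem.List.pyIdx?]

-- A's key-list build equals the iterates of keyStep
theorem buildK (k0 : Int) (n : Nat) :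
    (PySem.List.pyRange 0 (n : Int) 1).foldl
      (fun (k : List Int) _ =>
        let last := (PySem.List.pyGet? k (-1)).getD 0
        k ++ [PySem.Int.bxor (PySem.Int.bxor last (PySem.Int.bor (last <<< 1) (last >>> 15))) 0xFF00])
      [k0]
    = (List.range (n + 1)).map (fun i => keyStep^[i] k0) := by
  induction n with
  | zero => simp [PySem.List.pyRange_one_eq_nil (le_refl (0 : Int))]
  | succ n ih =>
    rw [show ((n + 1 : Nat) : Int) = (n : Int) + 1 by push_cast; ring,
        PySem.List.pyRange_one_succ_right (by positivity), List.foldl_append, ih]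
    simp only [List.foldl_cons, List.foldl_nil, List.range_succ, List.map_append, List.map_cons,
      List.map_nil, pyGet_append_last]
    rw [Function.iterate_succ_apply' keyStep n k0]
    rfl

theorem lookup_map_range (ks : Nat → Int) (a : Nat) (ha : a < 32) :
    (PySem.List.pyGet? ((List.range 32).map ks) (a : Int)).getD 0 = ks a := by
  rw [PySem.List.pyGet?_natCast]
  simp [ha]

-- A's round loop from position a equals pairGo with the running key ks a
theorem roundsK (k0 : Int) :
    ∀ (n a : Nat) (x y : Int), a + n = 32 →
    (PySem.List.pyRange (a : Int) 32 1).foldl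
      (fun (xy : Int × Int) r =>
        let x := xy.1
        let y := xy.2
        let t := PySem.Int.band (PySem.Int.bor (x <<< 1) (x >>> 15)) 0xFFFF
        let t := PySem.Int.bxor t (PySem.Int.band (PySem.Int.bor (x <<< 8) (x >>> 8)) 0xFFFF)
        let t := PySem.Int.bxor t (PySem.Int.bxor y
          ((PySem.List.pyGet? ((List.range 32).map (fun i => keyStep^[i] k0)) r).getD 0))
        (t, x))
      (x, y)
    = pairGo n (keyStep^[a] k0) x y := by
  intro n
  induction n with
  | zero =>
    intro a x y ha
    subst_vars
    rw [PySem.List.pyRange_one_eq_nil (by norm_num)]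
    rfl
  | succ n ih =>
    intro a x y ha
    have ha32 : (a : Int) < 32 := by exact_mod_cast Nat.lt_of_lt_of_le (Nat.lt_of_lt_of_le (Nat.lt_succ_self a) (by omega)) (le_refl 32)
    rw [PySem.List.pyRange_one_cons ha32, List.foldl_cons]
    simp only [lookup_map_range (fun i => keyStep^[i] k0) a (by omega)]
    rw [show (a : Int) + 1 = ((a + 1 : Nat) : Int) by push_cast; ring, ih (a + 1) _ _ (by omega)]
    show pairGo n (keyStep^[a+1] k0)
        (PySem.Int.bxor (PySem.Int.bxor
          (PySem.Int.band (PySem.Int.bor (x <<< 1) (x >>> 15)) 0xFFFF)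
          (PySem.Int.band (PySem.Int.bor (x <<< 8) (x >>> 8)) 0xFFFF))
          (PySem.Int.bxor y (keyStep^[a] k0))) x
      = pairGo (n + 1) (keyStep^[a] k0) x y
    rw [← bxor_assoc, Function.iterate_succ_apply' keyStep a k0]
    rfl

theorem simonGo_pairGo (n : Nat) (ck x y : Int) :
    simonGo n ck x y = PySem.Int.bor ((pairGo n ck x y).1 <<< 16) (pairGo n ck x y).2 := by
  induction n generalizing ck x y with
  | zero => rfl
  | succ n ih => rw [simonGo, pairGo]; exact ih _ _ _

-- ===== VERDICT (by name: the statement is the Claim_ definition above) =====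
set_option maxRecDepth 8192 in
theorem simon_encrypt_spec : Claim_equal_simon_encrypt := by
  intro plain key _
  unfold Spec_simon_encrypt simon_encrypt simon_encrypt_alt
  rw [show (31 : Int) = ((31 : Nat) : Int) by norm_num, buildK (PySem.Int.band key 0xFFFF) 31]
  have h0 := roundsK (PySem.Int.band key 0xFFFF) 32 0 (plain >>> 16) (PySem.Int.band plain 0xFFFF) (by omega)
  simp only [Nat.cast_zero, Function.iterate_zero, id] at h0
  exact (congrArg (fun p : Int × Int => PySem.Int.bor (p.1 <<< 16) p.2) h0).trans
    (simonGo_pairGo 32 _ _ _).symm
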